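-- pv_equiv track=rewrite | github.com/danielferriss/ATS | fa17-mts-dbhati2-master/midterm.py | string_my_one_true_love
-- ===== SOURCE A (Python) =====
-- def string_my_one_true_love(the_string):
-- 	if the_string is None:
-- 		return None
--
-- 	s = list(the_string)
-- 	x = []
--
-- 	for elem in s:
-- 		x.append(s.count(elem))
--
-- 	y = 0
--
-- 	for i in range(0, len(x)):
-- 		if y > 1:
-- 			break
-- 		for j in range(0, len(x)):
-- 			if y > 1:
-- 				break
-- 			if x[j] != x[i]:
-- 				x[j] = x[i]
-- 				y += 1
-- 				break
-- 	if y > 1: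
-- 		return False
-- 	return True
-- ===== SOURCE B (Python) =====
-- def string_my_one_true_love(the_string):
--     if the_string is None:
--         return None
--     if not the_string:
--         return True
--     freq = {}
--     for c in the_string:
--         freq[c] = freq.get(c, 0) + 1
--     target = freq[the_string[0]]
--     mismatched = sum(n for n in freq.values() if n != target)
--     return mismatched <= 1
-- ===== Notes on version B (the rewrite author's own statement) =====
-- stated objective: faster
-- what changed: A counts each character by a per-position scan and then runs a quadratic mutate-and-break double loop over the count list; B builds a frequency dictionary in one pass and sums the frequencies that differ from the first character's frequency, returning whether that sum is at most 1.
import Mathlib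
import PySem

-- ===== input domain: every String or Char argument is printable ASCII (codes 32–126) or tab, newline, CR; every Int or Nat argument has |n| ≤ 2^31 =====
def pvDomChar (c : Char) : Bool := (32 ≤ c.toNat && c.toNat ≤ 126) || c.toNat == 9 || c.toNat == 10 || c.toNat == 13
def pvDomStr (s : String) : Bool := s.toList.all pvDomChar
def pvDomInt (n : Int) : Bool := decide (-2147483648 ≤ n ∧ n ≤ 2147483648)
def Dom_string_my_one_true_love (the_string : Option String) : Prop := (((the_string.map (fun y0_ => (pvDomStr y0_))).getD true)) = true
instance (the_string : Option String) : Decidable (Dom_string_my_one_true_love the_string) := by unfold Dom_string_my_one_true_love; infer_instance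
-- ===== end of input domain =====

-- B replaces A's quadratic per-position counting and mutate-and-break double loop by a
-- one-pass frequency dictionary and a sum of the frequencies that differ from the first
-- character's frequency (faster).


-- ===== PORT A =====
-- inner 'for j in range(0, len(x))' loop: breaks when y > 1, or right after the first
-- j with x[j] != x[i] has been overwritten with x[i] and y incremented
def pvInnerA (i : Nat) (x : List Int) (y : Int) : List Nat → List Int × Int
  | [] => (x, y)
  | j :: js =>
    if y > 1 then (x, y)
    else if x.getD j 0 ≠ x.getD i 0 then (x.set j (x.getD i 0), y + 1)
    else pvInnerA i x y js

-- outer 'for i in range(0, len(x))' loop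
def pvOuterA : List Int → Int → List Nat → List Int × Int
  | x, y, [] => (x, y)
  | x, y, i :: is =>
    if y > 1 then (x, y)
    else
      let r := pvInnerA i x y (List.range x.length)
      pvOuterA r.1 r.2 is

def string_my_one_true_love (the_string : Option String) : Option Bool :=
  match the_string with
  | none => none
  | some str =>
    let s := str.toList
    -- for elem in s: x.append(s.count(elem))
    let x := s.foldl (fun acc c => acc ++ [((s.count c : Nat) : Int)]) []
    let r := pvOuterA x 0 (List.range x.length)
    if r.2 > 1 then some false else some true

-- ===== PORT B =====
def string_my_one_true_love_alt (the_string : Option String) : Option Bool :=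
  match the_string with
  | none => none
  | some str =>
    match str.toList with
    | [] => some true
    | c0 :: rest =>
      let s := c0 :: rest
      -- for c in the_string: freq[c] = freq.get(c, 0) + 1
      let freq := s.foldl (fun d c => d.insert c (d.getD c 0 + 1)) (PySem.Dict.empty : PySem.Dict Char Int)
      let target := freq.getD c0 0
      let mism := (freq.values.filter (fun n => n ≠ target)).sum
      some (decide (mism ≤ 1))

-- ===== PRECONDITION & SPEC =====
def Spec_string_my_one_true_love (the_string : Option String) (out : Option Bool) : Prop := out = string_my_one_true_love_alt the_string
instance (the_string : Option String) (out : Option Bool) : Decidable (Spec_string_my_one_true_love the_string out) := by unfold Spec_string_my_one_true_love; infer_instance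

-- ===== CLAIM (what is proved, stated in full; the proofs are below) =====
def Claim_equal_string_my_one_true_love : Prop := ∀ (the_string : Option String), Dom_string_my_one_true_love the_string → Spec_string_my_one_true_love the_string (string_my_one_true_love the_string)

-- ===== LEMMAS AND PROOFS =====

-- one unfolding step of the outer loop
theorem pvOuterA_cons (x : List Int) (y : Int) (i : Nat) (is : List Nat) :
    pvOuterA x y (i :: is) = if y > 1 then (x, y)
      else (let r := pvInnerA i x y (List.range x.length); pvOuterA r.1 r.2 is) := rfl

-- characterization of the inner loop: it finds the first mismatching index (if any)
theorem pvInnerA_eq (i : Nat) (x : List Int) (y : Int) (js : List Nat) :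
    pvInnerA i x y js =
      if y > 1 then (x, y)
      else match js.find? (fun j => decide (x.getD j 0 ≠ x.getD i 0)) with
        | none => (x, y)
        | some j => (x.set j (x.getD i 0), y + 1) := by
  induction js with
  | nil => simp [pvInnerA]
  | cons j js ih =>
    simp only [pvInnerA]
    by_cases hy : y > 1
    · simp [hy]
    · rw [if_neg hy, if_neg hy, List.find?_cons]
      by_cases hj : x.getD j 0 = x.getD i 0
      · simp only [List.getD] at hj
        simp [hj, ih, hy]
      · simp only [List.getD] at hj
        simp [hj]

-- once y > 1 the outer loop returns immediately
theorem pvOuterA_done (x : List Int) (y : Int) (is : List Nat) (hy : y > 1) :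
    pvOuterA x y is = (x, y) := by
  cases is with
  | nil => rfl
  | cons i is => simp [pvOuterA, hy]

-- if every in-range entry of x equals v, the outer loop changes nothing
theorem pvOuterA_all_eq (v : Int) : ∀ (is : List Nat) (x : List Int) (y : Int),
    (∀ j, j < x.length → x.getD j 0 = v) → (∀ i ∈ is, i < x.length) → ¬ y > 1 →
    pvOuterA x y is = (x, y) := by
  intro is
  induction is with
  | nil => intro x y _ _ _; rfl
  | cons i is ih =>
    intro x y hx his hy
    have hfind : (List.range x.length).find?
        (fun j => decide (x.getD j 0 ≠ x.getD i 0)) = none := by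
      rw [List.find?_eq_none]
      intro j hj
      simp only [List.mem_range] at hj
      have h1 : x.getD j 0 = v := hx j hj
      have h2 : x.getD i 0 = v := hx i (his i (by simp))
      simp only [List.getD] at h1 h2
      simp [h1, h2]
    simp only [pvOuterA, if_neg hy, pvInnerA_eq, hfind]
    exact ih x y hx (fun i' hi' => his i' (by simp [hi'])) hy

-- getD through set
theorem pv_getD_set_self (x : List Int) (p : Nat) (v : Int) (hp : p < x.length) :
    (x.set p v).getD p 0 = v := by
  simp [List.getD, List.getElem?_set_self hp]

theorem pv_getD_set_ne (x : List Int) (p j : Nat) (v : Int) (h : p ≠ j) :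
    (x.set p v).getD j 0 = x.getD j 0 := by
  simp [List.getD, List.getElem?_set_ne h]

-- index-filter over range has the same length as the value-filter of the list
theorem pv_filter_range_len (p : Int → Bool) : ∀ (x : List Int),
    ((List.range x.length).filter (fun j => p (x.getD j 0))).length = (x.filter p).length := by
  intro x
  induction x with
  | nil => simp
  | cons a t ih =>
    rw [List.length_cons, List.range_succ_eq_map, List.filter_cons]
    have hmap : ((List.map Nat.succ (List.range t.length)).filter
        (fun j => p ((a :: t).getD j 0))).length = (t.filter p).length := by
      have hfun : ((fun j => p ((a :: t).getD j 0)) ∘ Nat.succ) = (fun j => p (t.getD j 0)) := by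
        funext j
        simp [Function.comp, List.getD_cons_succ]
      rw [List.filter_map, List.length_map, hfun, ih]
    by_cases hpa : p a
    · rw [if_pos (by simpa using hpa), List.length_cons, hmap, List.filter_cons, if_pos hpa,
        List.length_cons]
    · rw [if_neg (by simpa using hpa), hmap, List.filter_cons, if_neg hpa]

-- split the filtered length of s into the occurrences of a and the rest
theorem pv_len_split (p : Char → Bool) (a : Char) : ∀ (s : List Char),
    (s.filter p).length =
      (if p a then s.count a else 0) + ((s.filter (fun c => !(c == a))).filter p).length := by
  intro s
  induction s with
  | nil => simp
  | cons c s ih =>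
    by_cases hca : c = a
    · subst hca
      by_cases hp : p c
      · simp [List.filter_cons, hp, List.count_cons, ih]
        try omega
      · simp [List.filter_cons, hp, List.count_cons, ih]
        try omega
    · have hba : (c == a) = false := by simp [hca]
      by_cases hp : p c
      · simp [List.filter_cons, hp, hba, List.count_cons, ih]
        try omega
      · simp [List.filter_cons, hp, hba, List.count_cons, ih]
        try omega

-- summing the multiplicities of the distinct characters selected by p counts the
-- positions of s selected by p
theorem pv_sum_counts (p : Char → Bool) : ∀ (l : List Char), l.Nodup →
    ∀ (s : List Char), (∀ c ∈ s, c ∈ l) →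
    ((l.filter p).map (fun k => ((s.count k : Nat) : Int))).sum = ((s.filter p).length : Int) := by
  intro l
  induction l with
  | nil =>
    intro _ s hs
    have hnil : s = [] := by
      cases s with
      | nil => rfl
      | cons a s => exact absurd (hs a (by simp)) (by simp)
    subst hnil; simp
  | cons a l ih =>
    intro hnd s hs
    have hal : a ∉ l := (List.nodup_cons.mp hnd).1
    have hndl : l.Nodup := (List.nodup_cons.mp hnd).2
    set s' := s.filter (fun c => !(c == a)) with hs'
    have hsub : ∀ c ∈ s', c ∈ l := by
      intro c hc
      rw [hs', List.mem_filter] at hc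
      have hca : c ≠ a := by simpa using hc.2
      rcases List.mem_cons.mp (hs c hc.1) with h | h
      · exact absurd h hca
      · exact h
    have hcnt : ∀ k ∈ l, s'.count k = s.count k := by
      intro k hk
      have hka : k ≠ a := fun h => hal (h ▸ hk)
      exact List.count_filter (by simp [hka])
    have hmap : (l.filter p).map (fun k => ((s.count k : Nat) : Int)) =
        (l.filter p).map (fun k => ((s'.count k : Nat) : Int)) := by
      apply List.map_congr_left
      intro k hk
      rw [hcnt k (List.mem_of_mem_filter hk)]
    have hihs := ih hndl s' hsub
    rw [pv_len_split p a s]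
    by_cases hpa : p a
    · rw [List.filter_cons, if_pos hpa, List.map_cons, List.sum_cons, hmap, hihs, if_pos hpa]
      push_cast
      ring
    · rw [List.filter_cons, if_neg hpa, hmap, hihs, if_neg hpa]
      push_cast
      ring

-- B on a nonempty string computes 'number of positions whose count differs from the
-- first character's count, at most 1'
theorem pv_alt_char (str : String) (c0 : Char) (rest : List Char)
    (h : str.toList = c0 :: rest) :
    string_my_one_true_love_alt (some str) =
      some (decide ((((((c0 :: rest).filter
        (fun c => decide ((((c0 :: rest).count c : Nat) : Int) ≠ (((c0 :: rest).count c0 : Nat) : Int)))).length : Nat) : Int)) ≤ 1)) := by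
  simp only [string_my_one_true_love_alt, h]
  rw [PySem.Dict.foldl_insert_getD_add_one_eq_counter]
  rw [PySem.Dict.getD_counter]
  simp only [PySem.Dict.values, PySem.Dict.items_counter, List.map_map]
  rw [List.filter_map]
  have hsum := pv_sum_counts
    (fun c => decide ((((c0 :: rest).count c : Nat) : Int) ≠ (((c0 :: rest).count c0 : Nat) : Int)))
    (PySem.Set.ofList (c0 :: rest)) (PySem.Set.nodup_ofList _)
    (c0 :: rest) (fun c hc => (PySem.Set.mem_ofList _ c).mpr hc)
  rw [← hsum]
  rfl

-- A on a nonempty string computes the same quantity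
theorem pv_a_char (str : String) (c0 : Char) (rest : List Char)
    (h : str.toList = c0 :: rest) :
    string_my_one_true_love (some str) =
      some (decide ((((((c0 :: rest).filter
        (fun c => decide ((((c0 :: rest).count c : Nat) : Int) ≠ (((c0 :: rest).count c0 : Nat) : Int)))).length : Nat) : Int)) ≤ 1)) := by
  have hfold : (c0 :: rest).foldl (fun acc c => acc ++ [(((c0 :: rest).count c : Nat) : Int)]) []
      = (c0 :: rest).map (fun c => (((c0 :: rest).count c : Nat) : Int)) := by
    rw [PySem.List.foldl_append_singleton_eq_map]
    rfl
  simp only [string_my_one_true_love, h, hfold]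
  set t : Int := (((c0 :: rest).count c0 : Nat) : Int) with htdef
  set x : List Int := (c0 :: rest).map (fun c => (((c0 :: rest).count c : Nat) : Int)) with hxdef
  set K : Nat := ((c0 :: rest).filter
      (fun c => decide ((((c0 :: rest).count c : Nat) : Int) ≠ t))).length with hKdef
  set L : List Nat := (List.range x.length).filter (fun j => decide (x.getD j 0 ≠ t)) with hLdef
  have hx0 : x.getD 0 0 = t := by rw [hxdef, List.map_cons, List.getD_cons_zero]
  have hKL : L.length = K := by
    rw [hLdef, pv_filter_range_len (fun v => decide (v ≠ t)) x, hKdef, hxdef, List.filter_map,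
      List.length_map]
    rfl
  have hmemL : ∀ j, j ∈ L ↔ (j < x.length ∧ x.getD j 0 ≠ t) := by
    intro j
    rw [hLdef, List.mem_filter, List.mem_range]
    simp
  have hnodL : L.Nodup := List.Sublist.nodup (List.filter_sublist) List.nodup_range
  rcases Nat.lt_or_ge L.length 2 with hN | hN
  · -- at most one mismatching position: A's counter y stays ≤ 1 and A returns True
    interval_cases hNv : L.length
    · -- no mismatching position at all
      have hall : ∀ j, j < x.length → x.getD j 0 = t := by
        intro j hj
        have hnot : j ∉ L := by simp [List.length_eq_zero_iff.mp hNv]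
        by_contra hne
        exact hnot ((hmemL j).mpr ⟨hj, hne⟩)
      rw [pvOuterA_all_eq t (List.range x.length) x 0 hall
        (fun i hi => List.mem_range.mp hi) (by norm_num)]
      have hK0 : K = 0 := by omega
      simp [hK0]
    · -- exactly one mismatching position a: the first pass overwrites it with t
      obtain ⟨a, hLa⟩ := List.length_eq_one_iff.mp hNv
      have haL : a ∈ L := by simp [hLa]
      have ha := (hmemL a).mp haL
      have ha0 : a ≠ 0 := fun h0 => ha.2 (h0 ▸ hx0)
      obtain ⟨m, hm⟩ : ∃ m, x.length = m + 1 := ⟨x.length - 1, by omega⟩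
      have hfindS : ((List.range x.length).find?
          (fun j => decide (x.getD j 0 ≠ x.getD 0 0))).isSome := by
        rw [List.find?_isSome]
        exact ⟨a, List.mem_range.mpr ha.1, by rw [hx0]; simpa using ha.2⟩
      obtain ⟨j, hj⟩ := Option.isSome_iff_exists.mp hfindS
      have hjm : x.getD j 0 ≠ t := by
        have hsome := List.find?_some hj
        rw [hx0] at hsome
        simpa using hsome
      have hjlt : j < x.length := List.mem_range.mp (List.mem_of_find?_eq_some hj)
      have hja : j = a := by
        have hjL : j ∈ L := (hmemL j).mpr ⟨hjlt, hjm⟩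
        simpa [hLa] using hjL
      have hstep0 : pvOuterA x 0 (List.range x.length) =
          pvOuterA (x.set j t) 1 ((List.range m).map Nat.succ) := by
        rw [hm, List.range_succ_eq_map, pvOuterA_cons]
        rw [if_neg (by norm_num), pvInnerA_eq, if_neg (by norm_num), hj, hx0]
        rfl
      have hall : ∀ jj, jj < (x.set j t).length → (x.set j t).getD jj 0 = t := by
        intro jj hjj
        rw [List.length_set] at hjj
        by_cases hjja : j = jj
        · rw [← hjja, pv_getD_set_self x j t hjlt]
        · rw [pv_getD_set_ne x j jj t hjja]
          by_contra hne
          have hjjL : jj ∈ L := (hmemL jj).mpr ⟨hjj, hne⟩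
          rw [hLa] at hjjL
          simp at hjjL
          exact hjja (by rw [hja, hjjL])
      have hmem1 : ∀ i ∈ (List.range m).map Nat.succ, i < (x.set j t).length := by
        intro i hi
        rw [List.length_set, hm]
        simp at hi
        omega
      have hfin := pvOuterA_all_eq t ((List.range m).map Nat.succ) (x.set j t) 1 hall hmem1
        (by norm_num)
      rw [hstep0, hfin, ← hKL]
      norm_num
  · -- at least two mismatching positions: y reaches 2 and A returns False
    obtain ⟨a, b, L2, hLab⟩ : ∃ a b L2, L = a :: b :: L2 := by
      match hLm : L, hN with
      | [], hN => simp at hN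
      | [a], hN => simp at hN
      | a :: b :: L2, _ => exact ⟨a, b, L2, rfl⟩
    have haL : a ∈ L := by simp [hLab]
    have hbL : b ∈ L := by simp [hLab]
    have hab : a ≠ b := by
      rw [hLab] at hnodL
      have := (List.nodup_cons.mp hnodL).1
      simp at this
      exact fun he => this.1 he
    have ha := (hmemL a).mp haL
    have hb := (hmemL b).mp hbL
    have ha0 : a ≠ 0 := fun h0 => ha.2 (h0 ▸ hx0)
    have hb0 : b ≠ 0 := fun h0 => hb.2 (h0 ▸ hx0)
    obtain ⟨m, hm⟩ : ∃ m, x.length = m + 2 := ⟨x.length - 2, by omega⟩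
    have hr2 : List.range (m + 2) = 0 :: 1 :: ((List.range m).map Nat.succ).map Nat.succ := by
      rw [List.range_succ_eq_map, List.range_succ_eq_map]
      rfl
    -- first pass: some mismatching position j is overwritten with t, y becomes 1
    have hfindS : ((List.range x.length).find?
        (fun j => decide (x.getD j 0 ≠ x.getD 0 0))).isSome := by
      rw [List.find?_isSome]
      exact ⟨a, List.mem_range.mpr ha.1, by rw [hx0]; simpa using ha.2⟩
    obtain ⟨j, hj⟩ := Option.isSome_iff_exists.mp hfindS
    have hjm : x.getD j 0 ≠ t := by
      have hsome := List.find?_some hj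
      rw [hx0] at hsome
      simpa using hsome
    have hjlt : j < x.length := List.mem_range.mp (List.mem_of_find?_eq_some hj)
    have hj0 : j ≠ 0 := fun h0 => hjm (h0 ▸ hx0)
    set x1 : List Int := x.set j t with hx1def
    have hlen1 : x1.length = x.length := List.length_set
    have hstep0 : pvOuterA x 0 (List.range x.length) =
        pvOuterA x1 1 (1 :: ((List.range m).map Nat.succ).map Nat.succ) := by
      rw [hm, hr2, pvOuterA_cons]
      rw [if_neg (by norm_num), pvInnerA_eq, if_neg (by norm_num), hj, hx0]
      rfl
    -- second pass: another mismatch (w.r.t. x1[1]) exists, y becomes 2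
    have hfindS2 : ((List.range x1.length).find?
        (fun j2 => decide (x1.getD j2 0 ≠ x1.getD 1 0))).isSome := by
      rw [List.find?_isSome]
      by_cases hc : x1.getD 1 0 = t
      · -- the untouched second mismatch still differs from t
        refine ⟨if a = j then b else a, ?_, ?_⟩
        · rw [List.mem_range, hlen1]
          split_ifs
          · exact hb.1
          · exact ha.1
        · rw [hc]
          split_ifs with haj
          · have hbj : j ≠ b := fun he => hab (by rw [haj, he])
            rw [hx1def, pv_getD_set_ne x j b t hbj]
            simpa using hb.2
          · have haj' : j ≠ a := fun he => haj he.symm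
            rw [hx1def, pv_getD_set_ne x j a t haj']
            simpa using ha.2
      · -- x1[1] itself differs from t = x1[0]
        refine ⟨0, by rw [List.mem_range, hlen1]; omega, ?_⟩
        have h01 : x1.getD 0 0 = t := by
          rw [hx1def, pv_getD_set_ne x j 0 t hj0, hx0]
        rw [h01]
        simpa using fun he => hc he.symm
    obtain ⟨j2, hj2⟩ := Option.isSome_iff_exists.mp hfindS2
    have hstep1 : pvOuterA x1 1 (1 :: ((List.range m).map Nat.succ).map Nat.succ) =
        pvOuterA (x1.set j2 (x1.getD 1 0)) 2 (((List.range m).map Nat.succ).map Nat.succ) := by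
      rw [pvOuterA_cons]
      rw [if_neg (by norm_num), pvInnerA_eq, if_neg (by norm_num), hj2]
      rfl
    rw [hstep0, hstep1, pvOuterA_done _ 2 _ (by norm_num)]
    have hK2 : 2 ≤ K := by omega
    have : ¬ ((K : Int) ≤ 1) := by
      push_cast
      omega
    simp [this]

-- ===== VERDICT (by name: the statement is the Claim_ definition above) =====
theorem string_my_one_true_love_spec : Claim_equal_string_my_one_true_love := by
  intro o _
  unfold Spec_string_my_one_true_love
  match o with
  | none => rfl
  | some str =>
    cases h : str.toList with
    | nil =>
      simp [string_my_one_true_love, string_my_one_true_love_alt, h, pvOuterA]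
    | cons c0 rest =>
      rw [pv_a_char str c0 rest h, pv_alt_char str c0 rest h]
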